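-- pv_equiv track=rewrite | github.com/Byron2306/Seraph-AI-12 | backend/threat_correlation.py | _determine_kill_chain_phase
-- ===== SOURCE A (Python) =====
-- from typing import Dict, List, Optional, Any, Set
--
-- def _determine_kill_chain_phase(threat: Dict) -> str:
--     """Determine approximate kill chain phase based on threat indicators"""
--     combined = f"{threat.get('name', '')} {threat.get('description', '')} {threat.get('type', '')}".lower()
--
--     if any(k in combined for k in ["recon", "scan", "enumeration", "discovery"]):
--         return "reconnaissance"
--     elif any(k in combined for k in ["phishing", "exploit", "payload", "dropper"]):
--         return "delivery"
--     elif any(k in combined for k in ["execute", "run", "spawn", "shellcode"]):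
--         return "exploitation"
--     elif any(k in combined for k in ["persistence", "service", "registry", "scheduled"]):
--         return "installation"
--     elif any(k in combined for k in ["c2", "beacon", "callback", "command"]):
--         return "command_and_control"
--     elif any(k in combined for k in ["lateral", "pivot", "spread", "wmi", "psexec"]):
--         return "lateral_movement"
--     elif any(k in combined for k in ["exfil", "upload", "steal", "collect", "archive"]):
--         return "actions_on_objectives"
--     else:
--         return "unknown"
-- ===== SOURCE B (Python) =====
-- _PHASES = ["reconnaissance", "delivery", "exploitation", "installation",
--            "command_and_control", "lateral_movement", "actions_on_objectives"]
--
-- _KEYWORD_PHASE = {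
--     "recon": 0, "scan": 0, "enumeration": 0, "discovery": 0,
--     "phishing": 1, "exploit": 1, "payload": 1, "dropper": 1,
--     "execute": 2, "run": 2, "spawn": 2, "shellcode": 2,
--     "persistence": 3, "service": 3, "registry": 3, "scheduled": 3,
--     "c2": 4, "beacon": 4, "callback": 4, "command": 4,
--     "lateral": 5, "pivot": 5, "spread": 5, "wmi": 5, "psexec": 5,
--     "exfil": 6, "upload": 6, "steal": 6, "collect": 6, "archive": 6,
-- }
--
-- _LENGTHS = (2, 3, 4, 5, 6, 7, 8, 9, 11)  # the distinct keyword lengths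
--
--
-- def _determine_kill_chain_phase(threat):
--     """Determine approximate kill chain phase based on threat indicators.
--
--     Single left-to-right scan of the combined text: at each position, look up
--     every candidate-length substring in a keyword->phase dictionary and keep
--     the smallest (highest-priority) phase index seen; priority order equals
--     the kill chain order, so the minimum matches the first-matching group.
--     """
--     combined = f"{threat.get('name', '')} {threat.get('description', '')} {threat.get('type', '')}".lower()
--     best = 7
--     for i in range(len(combined)):
--         for L in _LENGTHS:
--             p = _KEYWORD_PHASE.get(combined[i:i + L])
--             if p is not None and p < best:
--                 best = p
--     return _PHASES[best] if best < 7 else "unknown"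
-- ===== Notes on version B (the rewrite author's own statement) =====
-- stated objective: alternative
-- what changed: Instead of testing each keyword group against the text with seven if/elif 'k in combined' branches, B makes one left-to-right scan over the text, hashing each candidate-length substring into a keyword->phase-priority dictionary and keeping the minimum priority, which equals the first-matching group since priority order is the chain order.
import Mathlib
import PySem

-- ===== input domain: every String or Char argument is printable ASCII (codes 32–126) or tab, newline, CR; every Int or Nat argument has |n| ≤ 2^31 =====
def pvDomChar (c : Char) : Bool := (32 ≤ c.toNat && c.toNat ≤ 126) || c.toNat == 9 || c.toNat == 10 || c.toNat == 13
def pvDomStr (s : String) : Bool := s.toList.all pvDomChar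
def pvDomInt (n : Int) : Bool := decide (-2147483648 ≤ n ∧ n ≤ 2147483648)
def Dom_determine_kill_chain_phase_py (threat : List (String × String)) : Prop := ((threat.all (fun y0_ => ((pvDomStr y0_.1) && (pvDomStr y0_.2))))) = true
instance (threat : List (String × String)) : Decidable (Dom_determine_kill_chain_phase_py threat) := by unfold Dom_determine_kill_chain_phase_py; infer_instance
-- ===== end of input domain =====

-- B replaces A's seven if/elif keyword-group substring tests by a single scan of the text
-- that hash-looks-up each candidate-length substring in a keyword -> phase-priority dict
-- and keeps the minimum priority (objective: alternative). Return values proved equal.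

-- ===== PORT A =====
-- combined = f"{threat.get('name','')} {threat.get('description','')} {threat.get('type','')}".lower()
def pvCombined (threat : List (String × String)) : List Char :=
  let d := PySem.Dict.mk threat
  PySem.Chars.lower ((d.getD "name" "").toList ++ ' ' :: (d.getD "description" "").toList
    ++ ' ' :: (d.getD "type" "").toList)

def determine_kill_chain_phase_py (threat : List (String × String)) : String :=
  let combined := pvCombined threat
  if ["recon", "scan", "enumeration", "discovery"].any (fun k => PySem.Chars.isIn k.toList combined) then
    "reconnaissance"
  else if ["phishing", "exploit", "payload", "dropper"].any (fun k => PySem.Chars.isIn k.toList combined) then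
    "delivery"
  else if ["execute", "run", "spawn", "shellcode"].any (fun k => PySem.Chars.isIn k.toList combined) then
    "exploitation"
  else if ["persistence", "service", "registry", "scheduled"].any (fun k => PySem.Chars.isIn k.toList combined) then
    "installation"
  else if ["c2", "beacon", "callback", "command"].any (fun k => PySem.Chars.isIn k.toList combined) then
    "command_and_control"
  else if ["lateral", "pivot", "spread", "wmi", "psexec"].any (fun k => PySem.Chars.isIn k.toList combined) then
    "lateral_movement"
  else if ["exfil", "upload", "steal", "collect", "archive"].any (fun k => PySem.Chars.isIn k.toList combined) then
    "actions_on_objectives"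
  else
    "unknown"

-- ===== PORT B =====
def pvPhases : List String :=
  ["reconnaissance", "delivery", "exploitation", "installation",
   "command_and_control", "lateral_movement", "actions_on_objectives"]

-- the keyword -> phase-priority dictionary _KEYWORD_PHASE of Source B (keys as List Char: combined is scanned as a char list)
def pvKwPairs : List (List Char × Nat) :=
  [("recon".toList, 0), ("scan".toList, 0), ("enumeration".toList, 0), ("discovery".toList, 0),
   ("phishing".toList, 1), ("exploit".toList, 1), ("payload".toList, 1), ("dropper".toList, 1),
   ("execute".toList, 2), ("run".toList, 2), ("spawn".toList, 2), ("shellcode".toList, 2),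
   ("persistence".toList, 3), ("service".toList, 3), ("registry".toList, 3), ("scheduled".toList, 3),
   ("c2".toList, 4), ("beacon".toList, 4), ("callback".toList, 4), ("command".toList, 4),
   ("lateral".toList, 5), ("pivot".toList, 5), ("spread".toList, 5), ("wmi".toList, 5), ("psexec".toList, 5),
   ("exfil".toList, 6), ("upload".toList, 6), ("steal".toList, 6), ("collect".toList, 6), ("archive".toList, 6)]

def pvKwDict : PySem.Dict (List Char) Nat := PySem.Dict.mk pvKwPairs

def pvLengths : List Nat := [2, 3, 4, 5, 6, 7, 8, 9, 11]

-- Source B: scan i over range(len(combined)); for each candidate length L look up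
-- combined[i:i+L] (PySem.Chars.slice with nonnegative bounds) in the dict, keep the minimum.
def determine_kill_chain_phase_py_alt (threat : List (String × String)) : String :=
  let combined := pvCombined threat
  let best := (List.range combined.length).foldl (fun (best : Nat) (i : Nat) =>
    pvLengths.foldl (fun (best : Nat) (L : Nat) =>
      match pvKwDict.get? (PySem.Chars.slice combined (some (i : Int)) (some ((i : Int) + (L : Int)))) with
      | some p => if p < best then p else best
      | none => best) best) 7
  -- _PHASES[best] if best < 7 else "unknown"  (getD: under the guard the index is in range)
  if best < 7 then pvPhases.getD best "unknown" else "unknown"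

-- ===== PRECONDITION & SPEC =====
def Spec_determine_kill_chain_phase_py (threat : List (String × String)) (out : String) : Prop := out = determine_kill_chain_phase_py_alt threat
instance (threat : List (String × String)) (out : String) : Decidable (Spec_determine_kill_chain_phase_py threat out) := by unfold Spec_determine_kill_chain_phase_py; infer_instance

-- ===== CLAIM (what is proved, stated in full; the proofs are below) =====
def Claim_equal_determine_kill_chain_phase_py : Prop := ∀ (threat : List (String × String)), Dom_determine_kill_chain_phase_py threat → Spec_determine_kill_chain_phase_py threat (determine_kill_chain_phase_py threat)

-- ===== LEMMAS AND PROOFS =====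

-- a keyword whose phase index is q and which occurs in c (what both programs detect)
def pvMatched (c : List Char) (q : Nat) : Prop := ∃ k, (k, q) ∈ pvKwPairs ∧ k <:+: c

-- B's min-accumulating step never increases the accumulator
theorem pvFoldl_le_init {α : Type} (g : Nat → α → Nat) (hg : ∀ b x, g b x ≤ b) :
    ∀ (l : List α) (b : Nat), l.foldl g b ≤ b := by
  intro l
  induction l with
  | nil => intro b; exact Nat.le_refl b
  | cons x xs ih => intro b; exact Nat.le_trans (ih (g b x)) (hg b x)

theorem pvFoldl_le_of_mem {α : Type} (g : Nat → α → Nat) (hg : ∀ b x, g b x ≤ b)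
    (q : Nat) (x : α) (hq : ∀ b, g b x ≤ q) :
    ∀ (l : List α) (b : Nat), x ∈ l → l.foldl g b ≤ q := by
  intro l
  induction l with
  | nil => intro b h; cases h
  | cons y ys ih =>
    intro b h
    rcases List.mem_cons.mp h with h | h
    · subst h
      exact Nat.le_trans (pvFoldl_le_init g hg ys (g b x)) (hq b)
    · exact ih (g b y) h

-- the fold result is either the initial value or justified by some element of the list
theorem pvFoldl_cases {α : Type} (g : Nat → α → Nat) (P : α → Nat → Prop)
    (hg : ∀ b x, g b x = b ∨ P x (g b x)) :
    ∀ (l : List α) (b : Nat), l.foldl g b = b ∨ ∃ x ∈ l, P x (l.foldl g b) := by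
  intro l
  induction l with
  | nil => intro b; exact Or.inl rfl
  | cons x xs ih =>
    intro b
    rcases ih (g b x) with h | ⟨y, hy, hP⟩
    · rw [List.foldl_cons, h]
      rcases hg b x with h' | h'
      · exact Or.inl h'
      · exact Or.inr ⟨x, List.mem_cons_self .., h ▸ h'⟩
    · exact Or.inr ⟨y, List.mem_cons_of_mem x hy, hP⟩

-- the step of B's inner loop
def pvStep (c : List Char) (i : Nat) (b : Nat) (L : Nat) : Nat :=
  match pvKwDict.get? ((c.drop i).take L) with
  | some p => if p < b then p else b
  | none => b

theorem pvStep_le (c : List Char) (i : Nat) : ∀ b L, pvStep c i b L ≤ b := by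
  intro b L
  unfold pvStep
  cases pvKwDict.get? ((c.drop i).take L) with
  | none => exact Nat.le_refl b
  | some p => dsimp only; split <;> omega

theorem pvStep_cases (c : List Char) (i : Nat) (b L : Nat) :
    pvStep c i b L = b ∨ pvKwDict.get? ((c.drop i).take L) = some (pvStep c i b L) := by
  unfold pvStep
  cases h : pvKwDict.get? ((c.drop i).take L) with
  | none => exact Or.inl rfl
  | some p =>
    dsimp only
    split
    · exact Or.inr rfl
    · exact Or.inl rfl

-- B's inner loop over the candidate lengths
def pvInner (c : List Char) (b i : Nat) : Nat := pvLengths.foldl (pvStep c i) b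

theorem pvInner_le (c : List Char) : ∀ b i, pvInner c b i ≤ b := by
  intro b i; exact pvFoldl_le_init (pvStep c i) (pvStep_le c i) pvLengths b

theorem pvInner_cases (c : List Char) (b i : Nat) :
    pvInner c b i = b ∨ ∃ L ∈ pvLengths, pvKwDict.get? ((c.drop i).take L) = some (pvInner c b i) := by
  exact pvFoldl_cases (pvStep c i)
    (fun L r => pvKwDict.get? ((c.drop i).take L) = some r)
    (fun b L => pvStep_cases c i b L) pvLengths b

-- B's whole scan
def pvBest (c : List Char) : Nat := (List.range c.length).foldl (pvInner c) 7

theorem pvBest_cases (c : List Char) :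
    pvBest c = 7 ∨ ∃ i ∈ List.range c.length, ∃ L ∈ pvLengths,
      pvKwDict.get? ((c.drop i).take L) = some (pvBest c) := by
  exact pvFoldl_cases (pvInner c)
    (fun i r => ∃ L ∈ pvLengths, pvKwDict.get? ((c.drop i).take L) = some r)
    (fun b i => pvInner_cases c b i) (List.range c.length) 7

theorem pvBest_le_of_hit (c : List Char) (i L q : Nat) (hi : i ∈ List.range c.length)
    (hL : L ∈ pvLengths) (h : pvKwDict.get? ((c.drop i).take L) = some q) :
    pvBest c ≤ q := by
  have hstep : ∀ b, pvStep c i b L ≤ q := by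
    intro b; unfold pvStep; rw [h]; dsimp only; split <;> omega
  have hinner : ∀ b, pvInner c b i ≤ q := fun b =>
    pvFoldl_le_of_mem (pvStep c i) (pvStep_le c i) q L hstep pvLengths b hL
  exact pvFoldl_le_of_mem (pvInner c) (pvInner_le c) q i hinner (List.range c.length) 7 hi

-- a dictionary hit at some scan position is exactly an occurring keyword of phase q
theorem pvHit_iff_matched (c : List Char) (q : Nat) :
    (∃ i ∈ List.range c.length, ∃ L ∈ pvLengths, pvKwDict.get? ((c.drop i).take L) = some q)
      ↔ pvMatched c q := by
  constructor
  · rintro ⟨i, hi, L, hL, hget⟩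
    refine ⟨(c.drop i).take L, PySem.Dict.mem_items_of_get?_eq_some pvKwDict hget, ?_⟩
    exact ⟨c.take i, (c.drop i).drop L, by simp⟩
  · rintro ⟨k, hk, hinf⟩
    have hne : k ≠ [] ∧ k.length ∈ pvLengths := by
      have h : ∀ p ∈ pvKwPairs, p.1 ≠ [] ∧ p.1.length ∈ pvLengths := by decide
      exact h (k, q) hk
    have hIn : PySem.Chars.isIn k c = true := (PySem.Chars.isIn_iff_infix k c).mpr hinf
    obtain ⟨j, hpre⟩ := (PySem.Chars.exists_prefix_drop_iff_isIn k c).mpr hIn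
    have hjlt : j < c.length := by
      by_contra hge
      have : c.drop j = [] := List.drop_eq_nil_of_le (by omega)
      rw [this, List.prefix_nil] at hpre
      exact hne.1 hpre
    refine ⟨j, List.mem_range.mpr hjlt, k.length, hne.2, ?_⟩
    rw [← List.prefix_iff_eq_take.mp hpre]
    exact (PySem.Dict.get?_eq_some_iff_mem_items pvKwDict k q (by decide)).mpr hk

theorem pvMatched_le_six (c : List Char) (q : Nat) (h : pvMatched c q) : q ≤ 6 := by
  obtain ⟨k, hk, -⟩ := h
  have : ∀ p ∈ pvKwPairs, p.2 ≤ 6 := by decide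
  exact this (k, q) hk

-- pvMatched at each literal phase index is exactly A's group condition
theorem pvM0 (c : List Char) : pvMatched c 0 ↔ (["recon", "scan", "enumeration", "discovery"].any (fun k => PySem.Chars.isIn k.toList c)) = true := by
  simp [pvMatched, pvKwPairs, PySem.Chars.isIn_iff_infix]

theorem pvM1 (c : List Char) : pvMatched c 1 ↔ (["phishing", "exploit", "payload", "dropper"].any (fun k => PySem.Chars.isIn k.toList c)) = true := by
  simp [pvMatched, pvKwPairs, PySem.Chars.isIn_iff_infix]

theorem pvM2 (c : List Char) : pvMatched c 2 ↔ (["execute", "run", "spawn", "shellcode"].any (fun k => PySem.Chars.isIn k.toList c)) = true := by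
  simp [pvMatched, pvKwPairs, PySem.Chars.isIn_iff_infix]

theorem pvM3 (c : List Char) : pvMatched c 3 ↔ (["persistence", "service", "registry", "scheduled"].any (fun k => PySem.Chars.isIn k.toList c)) = true := by
  simp [pvMatched, pvKwPairs, PySem.Chars.isIn_iff_infix]

theorem pvM4 (c : List Char) : pvMatched c 4 ↔ (["c2", "beacon", "callback", "command"].any (fun k => PySem.Chars.isIn k.toList c)) = true := by
  simp [pvMatched, pvKwPairs, PySem.Chars.isIn_iff_infix]

theorem pvM5 (c : List Char) : pvMatched c 5 ↔ (["lateral", "pivot", "spread", "wmi", "psexec"].any (fun k => PySem.Chars.isIn k.toList c)) = true := by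
  simp [pvMatched, pvKwPairs, PySem.Chars.isIn_iff_infix]

theorem pvM6 (c : List Char) : pvMatched c 6 ↔ (["exfil", "upload", "steal", "collect", "archive"].any (fun k => PySem.Chars.isIn k.toList c)) = true := by
  simp [pvMatched, pvKwPairs, PySem.Chars.isIn_iff_infix]

-- B's port computes pvBest of the combined text (the slice with nonnegative bounds is take/drop)
theorem pvAlt_eq (threat : List (String × String)) :
    determine_kill_chain_phase_py_alt threat =
      (if pvBest (pvCombined threat) < 7 then pvPhases.getD (pvBest (pvCombined threat)) "unknown" else "unknown") := by
  unfold determine_kill_chain_phase_py_alt pvBest pvInner pvStep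
  simp only [PySem.Chars.slice_eq_listSlice, PySem.List.slice_natCast_add]

-- ===== VERDICT (by name: the statement is the Claim_ definition above) =====
theorem determine_kill_chain_phase_py_spec : Claim_equal_determine_kill_chain_phase_py := by
  intro threat _
  unfold Spec_determine_kill_chain_phase_py
  rw [pvAlt_eq]
  unfold determine_kill_chain_phase_py
  set c := pvCombined threat with hc
  have hub : ∀ q, pvMatched c q → pvBest c ≤ q := by
    intro q hm
    obtain ⟨i, hi, L, hL, hget⟩ := (pvHit_iff_matched c q).mpr hm
    exact pvBest_le_of_hit c i L q hi hL hget
  have hcases' : pvBest c = 7 ∨ pvMatched c (pvBest c) := by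
    rcases pvBest_cases c with h | ⟨i, hi, L, hL, hget⟩
    · exact Or.inl h
    · exact Or.inr ((pvHit_iff_matched c _).mp ⟨i, hi, L, hL, hget⟩)
  by_cases h0 : (["recon", "scan", "enumeration", "discovery"].any (fun k => PySem.Chars.isIn k.toList c)) = true
  · rw [if_pos h0]
    have hle : pvBest c ≤ 0 := hub 0 ((pvM0 c).mpr h0)
    rw [Nat.le_zero.mp hle]
    rfl
  rw [if_neg h0]
  by_cases h1 : (["phishing", "exploit", "payload", "dropper"].any (fun k => PySem.Chars.isIn k.toList c)) = true
  · rw [if_pos h1]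
    have hle : pvBest c ≤ 1 := hub 1 ((pvM1 c).mpr h1)
    have heq : pvBest c = 1 := by
      rcases hcases' with h7 | hm'
      · omega
      · have e0 : pvBest c ≠ 0 := fun h => h0 ((pvM0 c).mp (h ▸ hm'))
        omega
    rw [heq]
    rfl
  rw [if_neg h1]
  by_cases h2 : (["execute", "run", "spawn", "shellcode"].any (fun k => PySem.Chars.isIn k.toList c)) = true
  · rw [if_pos h2]
    have hle : pvBest c ≤ 2 := hub 2 ((pvM2 c).mpr h2)
    have heq : pvBest c = 2 := by
      rcases hcases' with h7 | hm'
      · omega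
      · have e0 : pvBest c ≠ 0 := fun h => h0 ((pvM0 c).mp (h ▸ hm'))
        have e1 : pvBest c ≠ 1 := fun h => h1 ((pvM1 c).mp (h ▸ hm'))
        omega
    rw [heq]
    rfl
  rw [if_neg h2]
  by_cases h3 : (["persistence", "service", "registry", "scheduled"].any (fun k => PySem.Chars.isIn k.toList c)) = true
  · rw [if_pos h3]
    have hle : pvBest c ≤ 3 := hub 3 ((pvM3 c).mpr h3)
    have heq : pvBest c = 3 := by
      rcases hcases' with h7 | hm'
      · omega
      · have e0 : pvBest c ≠ 0 := fun h => h0 ((pvM0 c).mp (h ▸ hm'))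
        have e1 : pvBest c ≠ 1 := fun h => h1 ((pvM1 c).mp (h ▸ hm'))
        have e2 : pvBest c ≠ 2 := fun h => h2 ((pvM2 c).mp (h ▸ hm'))
        omega
    rw [heq]
    rfl
  rw [if_neg h3]
  by_cases h4 : (["c2", "beacon", "callback", "command"].any (fun k => PySem.Chars.isIn k.toList c)) = true
  · rw [if_pos h4]
    have hle : pvBest c ≤ 4 := hub 4 ((pvM4 c).mpr h4)
    have heq : pvBest c = 4 := by
      rcases hcases' with h7 | hm'
      · omega
      · have e0 : pvBest c ≠ 0 := fun h => h0 ((pvM0 c).mp (h ▸ hm'))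
        have e1 : pvBest c ≠ 1 := fun h => h1 ((pvM1 c).mp (h ▸ hm'))
        have e2 : pvBest c ≠ 2 := fun h => h2 ((pvM2 c).mp (h ▸ hm'))
        have e3 : pvBest c ≠ 3 := fun h => h3 ((pvM3 c).mp (h ▸ hm'))
        omega
    rw [heq]
    rfl
  rw [if_neg h4]
  by_cases h5 : (["lateral", "pivot", "spread", "wmi", "psexec"].any (fun k => PySem.Chars.isIn k.toList c)) = true
  · rw [if_pos h5]
    have hle : pvBest c ≤ 5 := hub 5 ((pvM5 c).mpr h5)
    have heq : pvBest c = 5 := by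
      rcases hcases' with h7 | hm'
      · omega
      · have e0 : pvBest c ≠ 0 := fun h => h0 ((pvM0 c).mp (h ▸ hm'))
        have e1 : pvBest c ≠ 1 := fun h => h1 ((pvM1 c).mp (h ▸ hm'))
        have e2 : pvBest c ≠ 2 := fun h => h2 ((pvM2 c).mp (h ▸ hm'))
        have e3 : pvBest c ≠ 3 := fun h => h3 ((pvM3 c).mp (h ▸ hm'))
        have e4 : pvBest c ≠ 4 := fun h => h4 ((pvM4 c).mp (h ▸ hm'))
        omega
    rw [heq]
    rfl
  rw [if_neg h5]
  by_cases h6 : (["exfil", "upload", "steal", "collect", "archive"].any (fun k => PySem.Chars.isIn k.toList c)) = true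
  · rw [if_pos h6]
    have hle : pvBest c ≤ 6 := hub 6 ((pvM6 c).mpr h6)
    have heq : pvBest c = 6 := by
      rcases hcases' with h7 | hm'
      · omega
      · have e0 : pvBest c ≠ 0 := fun h => h0 ((pvM0 c).mp (h ▸ hm'))
        have e1 : pvBest c ≠ 1 := fun h => h1 ((pvM1 c).mp (h ▸ hm'))
        have e2 : pvBest c ≠ 2 := fun h => h2 ((pvM2 c).mp (h ▸ hm'))
        have e3 : pvBest c ≠ 3 := fun h => h3 ((pvM3 c).mp (h ▸ hm'))
        have e4 : pvBest c ≠ 4 := fun h => h4 ((pvM4 c).mp (h ▸ hm'))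
        have e5 : pvBest c ≠ 5 := fun h => h5 ((pvM5 c).mp (h ▸ hm'))
        omega
    rw [heq]
    rfl
  rw [if_neg h6]
  have heq : pvBest c = 7 := by
    rcases hcases' with h7 | hm'
    · exact h7
    · have hs := pvMatched_le_six c _ hm'
      have e0 : pvBest c ≠ 0 := fun h => h0 ((pvM0 c).mp (h ▸ hm'))
      have e1 : pvBest c ≠ 1 := fun h => h1 ((pvM1 c).mp (h ▸ hm'))
      have e2 : pvBest c ≠ 2 := fun h => h2 ((pvM2 c).mp (h ▸ hm'))
      have e3 : pvBest c ≠ 3 := fun h => h3 ((pvM3 c).mp (h ▸ hm'))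
      have e4 : pvBest c ≠ 4 := fun h => h4 ((pvM4 c).mp (h ▸ hm'))
      have e5 : pvBest c ≠ 5 := fun h => h5 ((pvM5 c).mp (h ▸ hm'))
      have e6 : pvBest c ≠ 6 := fun h => h6 ((pvM6 c).mp (h ▸ hm'))
      omega
  rw [heq]
  rfl
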